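-- pv_equiv track=rewrite | github.com/ShihaoTan123/ner-industry | 10_train_bert.py | allowed_transitions
-- ===== SOURCE A (Python) =====
-- def parse_tag_type(label: str):
--     if label == "O":
--         return "O", None
--     t, typ = label.split("-", 1)
--     return t, typ
--
-- def allowed_transitions(labels, scheme="BIOES"):
--     ok = set()
--     for i, L1 in enumerate(labels):
--         t1, c1 = parse_tag_type(L1)
--         for j, L2 in enumerate(labels):
--             t2, c2 = parse_tag_type(L2)
--             legal = False
--             if scheme == "BIO":
--                 if t1 == "O":
--                     legal = (t2 in ("O", "B"))
--                 elif t1 == "B":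
--                     legal = (t2 in ("I", "O", "B")) and (t2 != "I" or c2 == c1)
--                 elif t1 == "I":
--                     legal = (t2 in ("I", "O", "B")) and (t2 != "I" or c2 == c1)
--             else:
--                 if t1 == "O":
--                     legal = (t2 in ("O", "B", "S"))
--                 elif t1 == "B":
--                     legal = (t2 in ("I", "E")) and (c2 == c1)
--                 elif t1 == "I":
--                     legal = (t2 in ("I", "E")) and (c2 == c1)
--                 elif t1 == "E":
--                     legal = (t2 in ("O", "B", "S"))
--                 elif t1 == "S":
--                     legal = (t2 in ("O", "B", "S"))
--             if legal:
--                 ok.add((i, j))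
--     return ok
-- ===== SOURCE B (Python) =====
-- def _parse(label):
--     if label == "O":
--         return "O", None
--     t, typ = label.split("-", 1)
--     return t, typ
--
-- def _merge(xs, ys):
--     # merge two strictly increasing disjoint index lists into one increasing list
--     out = []
--     a = b = 0
--     while a < len(xs) and b < len(ys):
--         if xs[a] < ys[b]:
--             out.append(xs[a]); a += 1
--         else:
--             out.append(ys[b]); b += 1
--     out.extend(xs[a:])
--     out.extend(ys[b:])
--     return out
--
-- def allowed_transitions(labels, scheme="BIOES"):
--     # parse every label ONCE, bucket target indices by structure, then emit
--     # source-index x target-bucket products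
--     parsed = [_parse(L) for L in labels]
--     if scheme == "BIO":
--         base = [j for j, (t, _) in enumerate(parsed) if t in ("O", "B")]
--         cont = {}
--         for j, (t, c) in enumerate(parsed):
--             if t == "I":
--                 cont.setdefault(c, []).append(j)
--         def targets(t, c):
--             if t == "O":
--                 return base
--             if t in ("B", "I"):
--                 return _merge(base, cont.get(c, []))
--             return []
--     else:
--         base = [j for j, (t, _) in enumerate(parsed) if t in ("O", "B", "S")]
--         cont = {}
--         for j, (t, c) in enumerate(parsed):
--             if t in ("I", "E"):
--                 cont.setdefault(c, []).append(j)
--         def targets(t, c):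
--             if t in ("O", "E", "S"):
--                 return base
--             if t in ("B", "I"):
--                 return cont.get(c, [])
--             return []
--     return {(i, j) for i, (t, c) in enumerate(parsed) for j in targets(t, c)}
-- ===== Notes on version B (the rewrite author's own statement) =====
-- stated objective: alternative
-- what changed: A re-parses and re-judges every ordered label pair in a nested O(n^2) scan; B parses each label once, buckets target indices into a class-free list plus per-class dict buckets, and emits each source's transitions as source-index x precomputed-bucket products (merging two sorted buckets for BIO B/I sources).
import Mathlib
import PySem

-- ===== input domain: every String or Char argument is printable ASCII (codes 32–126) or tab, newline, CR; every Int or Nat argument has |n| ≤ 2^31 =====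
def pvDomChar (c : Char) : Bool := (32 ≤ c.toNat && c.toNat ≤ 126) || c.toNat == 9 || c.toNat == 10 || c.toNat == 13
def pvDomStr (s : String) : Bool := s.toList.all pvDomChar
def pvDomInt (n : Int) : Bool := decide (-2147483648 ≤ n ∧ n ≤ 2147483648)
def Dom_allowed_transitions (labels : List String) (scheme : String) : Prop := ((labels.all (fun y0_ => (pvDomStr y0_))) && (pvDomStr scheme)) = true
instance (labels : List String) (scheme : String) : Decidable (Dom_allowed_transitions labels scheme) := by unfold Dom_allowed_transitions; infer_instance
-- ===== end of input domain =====

-- B re-implements A by parsing each label once and bucketing target indices per tag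
-- structure/class, emitting source-index × target-bucket products (objective: alternative).

-- ===== PORT A =====
-- hand port of `t, typ = label.split("-", 1)`: exact whenever '-' occurs in label
-- (Pre_ guarantees it); the unpack raises ValueError otherwise.
def pvParseA (L : String) : String × Option String :=
  if L = "O" then ("O", none)
  else
    let cs := L.toList
    let i := cs.idxOf '-'
    (String.ofList (cs.take i), some (String.ofList (cs.drop (i + 1))))

-- A's inline `legal` computation, branch for branch
def pvLegalA (scheme t1 : String) (c1 : Option String) (t2 : String) (c2 : Option String) : Bool :=
  if scheme = "BIO" then
    if t1 = "O" then (t2 == "O" || t2 == "B")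
    else if t1 = "B" then (t2 == "I" || t2 == "O" || t2 == "B") && (t2 != "I" || c2 == c1)
    else if t1 = "I" then (t2 == "I" || t2 == "O" || t2 == "B") && (t2 != "I" || c2 == c1)
    else false
  else
    if t1 = "O" then (t2 == "O" || t2 == "B" || t2 == "S")
    else if t1 = "B" then (t2 == "I" || t2 == "E") && (c2 == c1)
    else if t1 = "I" then (t2 == "I" || t2 == "E") && (c2 == c1)
    else if t1 = "E" then (t2 == "O" || t2 == "B" || t2 == "S")
    else if t1 = "S" then (t2 == "O" || t2 == "B" || t2 == "S")
    else false

def allowed_transitions (labels : List String) (scheme : String) : List (Int × Int) :=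
  (PySem.List.enumerate labels 0).foldl
    (fun ok p =>
      let tc1 := pvParseA p.2
      (PySem.List.enumerate labels 0).foldl
        (fun ok q =>
          let tc2 := pvParseA q.2
          if pvLegalA scheme tc1.1 tc1.2 tc2.1 tc2.2 then PySem.Set.add ok (p.1, q.1) else ok)
        ok)
    ([] : PySem.Set (Int × Int))

-- ===== PORT B =====
-- B's `_parse` (same code as A's helper): exact whenever '-' occurs in label (Pre_)
def pvParseB (L : String) : String × Option String :=
  if L = "O" then ("O", none)
  else
    let cs := L.toList
    let i := cs.idxOf '-'
    (String.ofList (cs.take i), some (String.ofList (cs.drop (i + 1))))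

-- B's `_merge` two-pointer loop, as the obvious structural recursion
def pvMerge : List Int → List Int → List Int
  | [], ys => ys
  | x :: xs, [] => x :: xs
  | x :: xs, y :: ys => if x < y then x :: pvMerge xs (y :: ys) else y :: pvMerge (x :: xs) ys

-- B's `targets` closures
def pvTargetsBIO (base : List Int) (cont : PySem.Dict (Option String) (List Int))
    (t : String) (c : Option String) : List Int :=
  if t == "O" then base
  else if t == "B" || t == "I" then pvMerge base (cont.getD c [])
  else []

def pvTargetsBIOES (base : List Int) (cont : PySem.Dict (Option String) (List Int))
    (t : String) (c : Option String) : List Int :=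
  if t == "O" || t == "E" || t == "S" then base
  else if t == "B" || t == "I" then cont.getD c []
  else []

def allowed_transitions_alt (labels : List String) (scheme : String) : List (Int × Int) :=
  let parsed := labels.map pvParseB
  let en := PySem.List.enumerate parsed 0
  if scheme = "BIO" then
    let base := (en.filter (fun q => q.2.1 == "O" || q.2.1 == "B")).map (·.1)
    let cont := en.foldl
      (fun d q => if q.2.1 == "I" then d.modify q.2.2 [] (· ++ [q.1]) else d)
      (PySem.Dict.empty : PySem.Dict (Option String) (List Int))
    en.foldl
      (fun s q => (pvTargetsBIO base cont q.2.1 q.2.2).foldl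
        (fun s j => PySem.Set.add s (q.1, j)) s)
      ([] : PySem.Set (Int × Int))
  else
    let base := (en.filter (fun q => q.2.1 == "O" || q.2.1 == "B" || q.2.1 == "S")).map (·.1)
    let cont := en.foldl
      (fun d q => if q.2.1 == "I" || q.2.1 == "E" then d.modify q.2.2 [] (· ++ [q.1]) else d)
      (PySem.Dict.empty : PySem.Dict (Option String) (List Int))
    en.foldl
      (fun s q => (pvTargetsBIOES base cont q.2.1 q.2.2).foldl
        (fun s j => PySem.Set.add s (q.1, j)) s)
      ([] : PySem.Set (Int × Int))

-- ===== PRECONDITION & SPEC =====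
-- Pre_ excludes exactly the labels on which Python's `label.split("-", 1)` two-way
-- unpack raises ValueError (a label that is neither "O" nor contains '-'); A raises
-- there (and so does B).
def Pre_allowed_transitions (labels : List String) (scheme : String) : Prop :=
  ∀ L ∈ labels, L = "O" ∨ '-' ∈ L.toList  -- (scheme is unrestricted)
instance (labels : List String) (scheme : String) : Decidable (Pre_allowed_transitions labels scheme) := by unfold Pre_allowed_transitions; infer_instance

def pvWitness_allowed_transitions : List String × String := (["O", "B-PER", "I-PER", "B-LOC"], "BIOES")

def Spec_allowed_transitions (labels : List String) (scheme : String) (out : List (Int × Int)) : Prop := out = allowed_transitions_alt labels scheme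
instance (labels : List String) (scheme : String) (out : List (Int × Int)) : Decidable (Spec_allowed_transitions labels scheme out) := by unfold Spec_allowed_transitions; infer_instance

-- ===== CLAIM (what is proved, stated in full; the proofs are below) =====
def Claim_equal_allowed_transitions : Prop := ∀ (labels : List String) (scheme : String), Dom_allowed_transitions labels scheme → Pre_allowed_transitions labels scheme → Spec_allowed_transitions labels scheme (allowed_transitions labels scheme)

-- ===== LEMMAS AND PROOFS =====

theorem pvParseB_eq (L : String) : pvParseB L = pvParseA L := rfl

theorem pvEnumerate_map {α β : Type} (xs : List α) (f : α → β) (s : Int) :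
    PySem.List.enumerate (xs.map f) s = (PySem.List.enumerate xs s).map (fun p => (p.1, f p.2)) := by
  induction xs generalizing s with
  | nil => rfl
  | cons x xs ih => simp [PySem.List.enumerate_cons, ih]

theorem pvMerge_nil_right (xs : List Int) : pvMerge xs [] = xs := by
  cases xs <;> simp [pvMerge]

theorem pvMerge_cons_left (x : Int) (xs ys : List Int) (h : ∀ y ∈ ys, x < y) :
    pvMerge (x :: xs) ys = x :: pvMerge xs ys := by
  cases ys with
  | nil => simp [pvMerge_nil_right]
  | cons y ys => simp [pvMerge, h y (List.mem_cons_self ..)]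

theorem pvMerge_cons_right (y : Int) (xs ys : List Int) (h : ∀ a ∈ xs, y < a) :
    pvMerge xs (y :: ys) = y :: pvMerge xs ys := by
  cases xs with
  | nil => simp [pvMerge]
  | cons a xs =>
    have : ¬ (a < y) := by have := h a (List.mem_cons_self ..); omega
    simp [pvMerge, this]

-- merging the index lists of two disjoint filters of a fst-increasing list is the
-- index list of the disjunction filter
theorem pvMerge_filters {α : Type} (l : List (Int × α)) (P Q : Int × α → Bool)
    (hl : l.Pairwise (fun a b => a.1 < b.1)) (hdisj : ∀ x, ¬(P x = true ∧ Q x = true)) :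
    pvMerge ((l.filter P).map (·.1)) ((l.filter Q).map (·.1))
      = (l.filter (fun x => P x || Q x)).map (·.1) := by
  induction l with
  | nil => simp [pvMerge]
  | cons x l ih =>
    have hx : ∀ y ∈ l, x.1 < y.1 := (List.pairwise_cons.mp hl).1
    have hl' := (List.pairwise_cons.mp hl).2
    by_cases hP : P x = true
    · have hQ : Q x = false := by
        rcases Bool.eq_false_or_eq_true (Q x) with h | h
        · exact absurd ⟨hP, h⟩ (hdisj x)
        · exact h
      have hlt : ∀ y ∈ (l.filter Q).map (·.1), x.1 < y := by
        intro y hy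
        obtain ⟨q, hq, rfl⟩ := List.mem_map.mp hy
        exact hx q (List.mem_of_mem_filter hq)
      simp only [List.filter_cons, hP, hQ, Bool.false_eq_true, if_false, if_true,
        List.map_cons, Bool.true_or]
      rw [pvMerge_cons_left _ _ _ hlt, ih hl']
    · have hP' : P x = false := by simpa using hP
      by_cases hQ : Q x = true
      · have hlt : ∀ a ∈ (l.filter P).map (·.1), x.1 < a := by
          intro a ha
          obtain ⟨q, hq, rfl⟩ := List.mem_map.mp ha
          exact hx q (List.mem_of_mem_filter hq)
        simp only [List.filter_cons, hP', hQ, Bool.false_eq_true, if_false, if_true,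
          List.map_cons, Bool.or_true]
        rw [pvMerge_cons_right _ _ _ hlt, ih hl']
      · have hQ' : Q x = false := by simpa using hQ
        simp only [List.filter_cons, hP', hQ', Bool.false_eq_true, if_false,
          Bool.false_or]
        exact ih hl'

-- an inner Set.add loop over fresh distinct targets appends
theorem pvInnerFold (i : Int) (js : List Int) (s : List (Int × Int))
    (hnd : js.Nodup) (hfresh : ∀ j ∈ js, (i, j) ∉ s) :
    js.foldl (fun s j => PySem.Set.add s (i, j)) s = s ++ js.map (fun j => (i, j)) := by
  induction js generalizing s with
  | nil => simp
  | cons j js ih =>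
    have hj : (i, j) ∉ s := hfresh j (List.mem_cons_self ..)
    simp only [List.foldl_cons, PySem.Set.add_of_not_mem hj]
    rw [ih (s ++ [(i, j)]) (List.nodup_cons.mp hnd).2 (fun j' hj' hmem => ?_)]
    · simp
    · rcases List.mem_append.mp hmem with h | h
      · exact hfresh j' (List.mem_cons_of_mem _ hj') h
      · have : j' = j := by simpa using h
        exact (List.nodup_cons.mp hnd).1 (this ▸ hj')

-- the outer loop over fst-increasing sources with per-source Nodup targets is a flatMap
theorem pvOuterFold {α : Type} (l : List (Int × α)) (tg : Int × α → List Int)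
    (s : List (Int × Int))
    (hl : l.Pairwise (fun a b => a.1 < b.1))
    (htg : ∀ p, (tg p).Nodup)
    (hfresh : ∀ p ∈ l, ∀ x ∈ s, x.1 ≠ p.1) :
    l.foldl (fun s p => (tg p).foldl (fun s j => PySem.Set.add s (p.1, j)) s) s
      = s ++ l.flatMap (fun p => (tg p).map (fun j => (p.1, j))) := by
  induction l generalizing s with
  | nil => simp
  | cons p l ih =>
    have hx : ∀ y ∈ l, p.1 < y.1 := (List.pairwise_cons.mp hl).1
    have hl' := (List.pairwise_cons.mp hl).2
    simp only [List.foldl_cons]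
    rw [pvInnerFold p.1 (tg p) s (htg p)
      (fun j _ hmem => (hfresh p (List.mem_cons_self ..) _ hmem) rfl)]
    rw [ih (s ++ (tg p).map (fun j => (p.1, j))) hl' (fun q hq x hxmem => ?_)]
    · simp
    · rcases List.mem_append.mp hxmem with h | h
      · exact hfresh q (List.mem_cons_of_mem _ hq) x h
      · obtain ⟨j, _, rfl⟩ := List.mem_map.mp h
        have := hx q hq
        simp only []
        omega

-- ---- proof-side abbreviations ----

def pvTgA (labels : List String) (scheme : String) (p : Int × String) : List Int :=
  ((PySem.List.enumerate labels 0).filter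
    (fun q => pvLegalA scheme (pvParseA p.2).1 (pvParseA p.2).2 (pvParseA q.2).1 (pvParseA q.2).2)).map (·.1)

def pvBaseBIO (labels : List String) : List Int :=
  ((PySem.List.enumerate labels 0).filter
    (fun q => (pvParseA q.2).1 == "O" || (pvParseA q.2).1 == "B")).map (·.1)

def pvContBIO (labels : List String) : PySem.Dict (Option String) (List Int) :=
  (PySem.List.enumerate labels 0).foldl
    (fun d q => if (pvParseA q.2).1 == "I" then d.modify (pvParseA q.2).2 [] (· ++ [q.1]) else d)
    PySem.Dict.empty

def pvBaseBIOES (labels : List String) : List Int :=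
  ((PySem.List.enumerate labels 0).filter
    (fun q => (pvParseA q.2).1 == "O" || (pvParseA q.2).1 == "B" || (pvParseA q.2).1 == "S")).map (·.1)

def pvContBIOES (labels : List String) : PySem.Dict (Option String) (List Int) :=
  (PySem.List.enumerate labels 0).foldl
    (fun d q => if (pvParseA q.2).1 == "I" || (pvParseA q.2).1 == "E" then d.modify (pvParseA q.2).2 [] (· ++ [q.1]) else d)
    PySem.Dict.empty

theorem pvFilterMapNodup (labels : List String) (P : Int × String → Bool) :
    (((PySem.List.enumerate labels 0).filter P).map (·.1)).Nodup := by
  have h : ((PySem.List.enumerate labels 0).filter P).Pairwise (fun a b => a.1 < b.1) :=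
    (PySem.List.pairwise_lt_enumerate ..).filter P
  exact (List.pairwise_map.mpr h).imp (fun hlt => ne_of_lt hlt)

-- the grouping loop, characterized: the bucket of class c holds the indices of the
-- "I"-labels (resp. "I"/"E"-labels) of class c
theorem pvContBIO_getD (labels : List String) (c : Option String) :
    (pvContBIO labels).getD c []
      = ((PySem.List.enumerate labels 0).filter
          (fun q => ((pvParseA q.2).1 == "I") && ((pvParseA q.2).2 == c))).map (·.1) := by
  have h := PySem.Dict.getD_foldl_modify_append
    (l := ((PySem.List.enumerate labels 0).filter (fun q => (pvParseA q.2).1 == "I")).map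
      (fun q => ((pvParseA q.2).2, q.1)))
    (d := (PySem.Dict.empty : PySem.Dict (Option String) (List Int))) (c := c)
  simp only [List.foldl_map, List.foldl_filter, List.filter_map, List.map_map,
    Function.comp_def, PySem.Dict.getD_empty, List.nil_append, List.filter_filter] at h
  rw [pvContBIO]
  rw [h]
  exact congrArg _ (List.filter_congr fun a _ => Bool.and_comm ..)

theorem pvContBIOES_getD (labels : List String) (c : Option String) :
    (pvContBIOES labels).getD c []
      = ((PySem.List.enumerate labels 0).filter
          (fun q => ((pvParseA q.2).1 == "I" || (pvParseA q.2).1 == "E") && ((pvParseA q.2).2 == c))).map (·.1) := by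
  have h := PySem.Dict.getD_foldl_modify_append
    (l := ((PySem.List.enumerate labels 0).filter (fun q => (pvParseA q.2).1 == "I" || (pvParseA q.2).1 == "E")).map
      (fun q => ((pvParseA q.2).2, q.1)))
    (d := (PySem.Dict.empty : PySem.Dict (Option String) (List Int))) (c := c)
  simp only [List.foldl_map, List.foldl_filter, List.filter_map, List.map_map,
    Function.comp_def, PySem.Dict.getD_empty, List.nil_append, List.filter_filter] at h
  rw [pvContBIOES]
  rw [h]
  exact congrArg _ (List.filter_congr fun a _ => Bool.and_comm ..)

-- A's BIO legality for a B/I source, regrouped as "class-free target or same-class I target"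
theorem pvBoolBIO (t2 : String) (c1 c2 : Option String) :
    ((t2 == "I" || t2 == "O" || t2 == "B") && (t2 != "I" || c2 == c1))
      = ((t2 == "O" || t2 == "B") || ((t2 == "I") && (c2 == c1))) := by
  by_cases h : t2 = "I"
  · subst h; simp
  · have hI : (t2 == "I") = false := by simpa using h
    simp [hI]
    tauto

-- B's BIO target buckets give exactly A's BIO-legal successor indices
theorem pvTgBIO (labels : List String) (t : String) (c : Option String) :
    pvTargetsBIO (pvBaseBIO labels) (pvContBIO labels) t c
      = ((PySem.List.enumerate labels 0).filter
          (fun q => pvLegalA "BIO" t c (pvParseA q.2).1 (pvParseA q.2).2)).map (·.1) := by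
  have hmerge :
      pvMerge (pvBaseBIO labels) ((pvContBIO labels).getD c [])
        = ((PySem.List.enumerate labels 0).filter
            (fun q => ((pvParseA q.2).1 == "O" || (pvParseA q.2).1 == "B")
              || (((pvParseA q.2).1 == "I") && ((pvParseA q.2).2 == c)))).map (·.1) := by
    rw [pvBaseBIO, pvContBIO_getD]
    refine pvMerge_filters _ _ _ (PySem.List.pairwise_lt_enumerate ..) (fun x hx => ?_)
    obtain ⟨h1, h2⟩ := hx
    have := (Bool.and_eq_true ..).mp h2
    rcases (Bool.or_eq_true ..).mp h1 with h | h <;>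
      · have ht := beq_iff_eq.mp this.1
        have h' := beq_iff_eq.mp h
        rw [h'] at ht
        exact absurd ht (by decide)
  by_cases hO : t = "O"
  · subst hO
    simp [pvTargetsBIO, pvLegalA, pvBaseBIO]
  · by_cases hB : t = "B"
    · subst hB
      rw [pvTargetsBIO]
      simp only [show (("B" : String) == "O") = false from by decide, Bool.false_eq_true,
        if_false, show (("B" : String) == "B") = true from by decide, Bool.true_or, if_true]
      rw [hmerge]
      simp only [pvLegalA]
      simp [pvBoolBIO]
    · by_cases hI : t = "I"
      · subst hI
        rw [pvTargetsBIO]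
        simp only [show (("I" : String) == "O") = false from by decide, Bool.false_eq_true,
          if_false, show (("I" : String) == "B") = false from by decide,
          show (("I" : String) == "I") = true from by decide, Bool.or_true, if_true]
        rw [hmerge]
        simp only [pvLegalA]
        simp [pvBoolBIO]
      · have h1 : (t == "O") = false := by simpa using hO
        have h2 : (t == "B") = false := by simpa using hB
        have h3 : (t == "I") = false := by simpa using hI
        rw [pvTargetsBIO]
        simp only [h1, h2, h3, Bool.false_eq_true, if_false, Bool.or_self]
        rw [show (fun q : Int × String => pvLegalA "BIO" t c (pvParseA q.2).1 (pvParseA q.2).2)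
            = (fun _ => false) from ?_]
        · simp
        · funext q
          simp [pvLegalA, hO, hB, hI]

-- B's BIOES target buckets give exactly A's successor indices for any non-"BIO" scheme
theorem pvTgBIOES (labels : List String) (scheme : String) (hs : scheme ≠ "BIO")
    (t : String) (c : Option String) :
    pvTargetsBIOES (pvBaseBIOES labels) (pvContBIOES labels) t c
      = ((PySem.List.enumerate labels 0).filter
          (fun q => pvLegalA scheme t c (pvParseA q.2).1 (pvParseA q.2).2)).map (·.1) := by
  by_cases hO : t = "O"
  · subst hO; simp [pvTargetsBIOES, pvLegalA, hs, pvBaseBIOES]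
  · by_cases hB : t = "B"
    · subst hB
      rw [pvTargetsBIOES]
      simp only [show (("B" : String) == "O") = false from by decide,
        show (("B" : String) == "E") = false from by decide,
        show (("B" : String) == "S") = false from by decide,
        show (("B" : String) == "B") = true from by decide,
        Bool.false_eq_true, Bool.or_self, if_false, Bool.true_or, if_true]
      rw [pvContBIOES_getD]
      simp [pvLegalA, hs]
    · by_cases hI : t = "I"
      · subst hI
        rw [pvTargetsBIOES]
        simp only [show (("I" : String) == "O") = false from by decide,
          show (("I" : String) == "E") = false from by decide,
          show (("I" : String) == "S") = false from by decide,
          show (("I" : String) == "B") = false from by decide,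
          show (("I" : String) == "I") = true from by decide,
          Bool.false_eq_true, Bool.or_self, if_false, Bool.or_true, if_true]
        rw [pvContBIOES_getD]
        simp [pvLegalA, hs, show ("I" : String) ≠ "O" from by decide,
          show ("I" : String) ≠ "B" from by decide]
      · by_cases hE : t = "E"
        · subst hE; simp [pvTargetsBIOES, pvLegalA, hs, pvBaseBIOES,
            show ("E" : String) ≠ "O" from by decide, show ("E" : String) ≠ "B" from by decide,
            show ("E" : String) ≠ "I" from by decide]
        · by_cases hS : t = "S"
          · subst hS; simp [pvTargetsBIOES, pvLegalA, hs, pvBaseBIOES,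
              show ("S" : String) ≠ "O" from by decide, show ("S" : String) ≠ "B" from by decide,
              show ("S" : String) ≠ "I" from by decide, show ("S" : String) ≠ "E" from by decide]
          · have h1 : (t == "O") = false := by simpa using hO
            have h2 : (t == "B") = false := by simpa using hB
            have h3 : (t == "I") = false := by simpa using hI
            have h4 : (t == "E") = false := by simpa using hE
            have h5 : (t == "S") = false := by simpa using hS
            rw [pvTargetsBIOES]
            simp only [h1, h2, h3, h4, h5, Bool.false_eq_true, if_false, Bool.or_self]
            rw [show (fun q : Int × String => pvLegalA scheme t c (pvParseA q.2).1 (pvParseA q.2).2)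
                = (fun _ => false) from ?_]
            · simp
            · funext q
              simp [pvLegalA, hs, hO, hB, hI, hE, hS]

theorem pvA_char (labels : List String) (scheme : String) :
    allowed_transitions labels scheme
      = (PySem.List.enumerate labels 0).flatMap
          (fun p => (pvTgA labels scheme p).map (fun j => (p.1, j))) := by
  have hfun : (fun (ok : PySem.Set (Int × Int)) (p : Int × String) =>
      let tc1 := pvParseA p.2
      (PySem.List.enumerate labels 0).foldl
        (fun ok q =>
          let tc2 := pvParseA q.2
          if pvLegalA scheme tc1.1 tc1.2 tc2.1 tc2.2 then PySem.Set.add ok (p.1, q.1) else ok)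
        ok)
      = (fun ok p => (pvTgA labels scheme p).foldl (fun s j => PySem.Set.add s (p.1, j)) ok) := by
    funext ok p
    rw [pvTgA, List.foldl_map, List.foldl_filter]
  rw [allowed_transitions, hfun]
  exact pvOuterFold _ _ _ (PySem.List.pairwise_lt_enumerate ..)
    (fun p => pvFilterMapNodup ..) (by simp)

theorem pvEnParsed (labels : List String) :
    PySem.List.enumerate (labels.map pvParseB) 0
      = (PySem.List.enumerate labels 0).map (fun r => (r.1, pvParseA r.2)) := by
  rw [show labels.map pvParseB = labels.map pvParseA from by simp [pvParseB_eq]]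
  exact pvEnumerate_map ..

theorem pvB_char (labels : List String) (scheme : String) :
    allowed_transitions_alt labels scheme
      = (PySem.List.enumerate labels 0).flatMap
          (fun p => (pvTgA labels scheme p).map (fun j => (p.1, j))) := by
  by_cases hs : scheme = "BIO"
  · subst hs
    rw [allowed_transitions_alt]
    simp only [pvEnParsed, List.foldl_map, List.filter_map, List.map_map]
    rw [show ((PySem.List.enumerate labels 0).filter
        ((fun q : Int × (String × Option String) => q.2.1 == "O" || q.2.1 == "B") ∘
          (fun r : Int × String => (r.1, pvParseA r.2)))).map
        ((fun x : Int × (String × Option String) => x.1) ∘ (fun r : Int × String => (r.1, pvParseA r.2)))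
        = pvBaseBIO labels from rfl]
    rw [show ((PySem.List.enumerate labels 0).foldl
        (fun (d : PySem.Dict (Option String) (List Int)) (r : Int × String) =>
          if (r.1, pvParseA r.2).2.1 == "I" then d.modify (r.1, pvParseA r.2).2.2 [] (· ++ [r.1]) else d)
        PySem.Dict.empty) = pvContBIO labels from rfl]
    rw [pvOuterFold (PySem.List.enumerate labels 0)
      (fun r => pvTargetsBIO (pvBaseBIO labels) (pvContBIO labels) (pvParseA r.2).1 (pvParseA r.2).2)
      [] (PySem.List.pairwise_lt_enumerate ..)
      (fun r => by
        show (pvTargetsBIO (pvBaseBIO labels) (pvContBIO labels) (pvParseA r.2).1 (pvParseA r.2).2).Nodup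
        rw [pvTgBIO]
        exact pvFilterMapNodup ..)
      (by simp)]
    simp only [List.nil_append]
    refine List.flatMap_congr (fun r _ => ?_)
    rw [pvTgBIO, pvTgA]
  · rw [allowed_transitions_alt]
    simp only [if_neg hs, pvEnParsed, List.foldl_map, List.filter_map, List.map_map]
    rw [show ((PySem.List.enumerate labels 0).filter
        ((fun q : Int × (String × Option String) => q.2.1 == "O" || q.2.1 == "B" || q.2.1 == "S") ∘
          (fun r : Int × String => (r.1, pvParseA r.2)))).map
        ((fun x : Int × (String × Option String) => x.1) ∘ (fun r : Int × String => (r.1, pvParseA r.2)))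
        = pvBaseBIOES labels from rfl]
    rw [show ((PySem.List.enumerate labels 0).foldl
        (fun (d : PySem.Dict (Option String) (List Int)) (r : Int × String) =>
          if (r.1, pvParseA r.2).2.1 == "I" || (r.1, pvParseA r.2).2.1 == "E" then
            d.modify (r.1, pvParseA r.2).2.2 [] (· ++ [r.1]) else d)
        PySem.Dict.empty) = pvContBIOES labels from rfl]
    rw [pvOuterFold (PySem.List.enumerate labels 0)
      (fun r => pvTargetsBIOES (pvBaseBIOES labels) (pvContBIOES labels) (pvParseA r.2).1 (pvParseA r.2).2)
      [] (PySem.List.pairwise_lt_enumerate ..)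
      (fun r => by
        show (pvTargetsBIOES (pvBaseBIOES labels) (pvContBIOES labels) (pvParseA r.2).1 (pvParseA r.2).2).Nodup
        rw [pvTgBIOES labels scheme hs]
        exact pvFilterMapNodup ..)
      (by simp)]
    simp only [List.nil_append]
    refine List.flatMap_congr (fun r _ => ?_)
    rw [pvTgBIOES labels scheme hs, pvTgA]

theorem pvAB (labels : List String) (scheme : String) :
    allowed_transitions labels scheme = allowed_transitions_alt labels scheme :=
  (pvA_char labels scheme).trans (pvB_char labels scheme).symm

theorem allowed_transitions_spec : Claim_equal_allowed_transitions := by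
  intro labels scheme _ _
  unfold Spec_allowed_transitions
  exact pvAB labels scheme
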